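-- pv_equiv track=rewrite | github.com/dagaither/algo-anagrams-i | python/character_match.py | is_character_match
-- ===== SOURCE A (Python) =====
-- def is_character_match(string1, string2):
-- 	match1 = ""
-- 	match2 = ""
--
-- 	for i in string1.lower():
-- 		if i.isalnum() and i in string2.lower():
-- 			match1 += i
--
-- 	for i in string2.lower():
-- 		if i.isalnum() and i in string1.lower():
-- 			match2 += i
--
-- 	if len(match1) == len(match2):
-- 		return True
-- 	else:
-- 		return False
-- ===== SOURCE B (Python) =====
-- def is_character_match(string1, string2):
--     c1 = {}
--     for ch in string1.lower():
--         c1[ch] = c1.get(ch, 0) + 1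
--     c2 = {}
--     for ch in string2.lower():
--         c2[ch] = c2.get(ch, 0) + 1
--     n1 = 0
--     n2 = 0
--     for ch, k in c1.items():
--         if ch.isalnum() and ch in c2:
--             n1 += k
--             n2 += c2[ch]
--     return n1 == n2
-- ===== Notes on version B (the rewrite author's own statement) =====
-- stated objective: faster
-- what changed: Replaces A's two filter-append loops (each character re-lowers and scans the other whole string for membership) with two frequency dictionaries built in one pass each, then a single summation pass over the shared qualifying keys comparing the two totals.
import Mathlib
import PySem

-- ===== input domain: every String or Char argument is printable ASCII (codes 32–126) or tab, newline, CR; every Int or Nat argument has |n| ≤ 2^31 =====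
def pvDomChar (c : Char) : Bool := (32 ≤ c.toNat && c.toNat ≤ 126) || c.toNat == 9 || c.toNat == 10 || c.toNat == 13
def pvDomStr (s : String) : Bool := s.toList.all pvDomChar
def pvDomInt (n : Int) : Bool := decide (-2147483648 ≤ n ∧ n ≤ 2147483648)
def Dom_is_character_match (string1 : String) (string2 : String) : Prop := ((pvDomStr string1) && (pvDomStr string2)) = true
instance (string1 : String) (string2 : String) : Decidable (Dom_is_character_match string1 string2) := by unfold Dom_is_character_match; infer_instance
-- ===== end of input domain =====

-- B replaces A's two quadratic filter loops (each char re-scans the other lowered string)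
-- with two frequency dictionaries and one summation pass over the shared keys; objective: faster.

-- ===== PORT A =====
def is_character_match (string1 : String) (string2 : String) : Bool :=
  let match1 := (PySem.Chars.lower string1.toList).foldl
      (fun acc i => if PySem.Chars.isalnum i && (PySem.Chars.lower string2.toList).contains i
                    then acc ++ [i] else acc) []
  let match2 := (PySem.Chars.lower string2.toList).foldl
      (fun acc i => if PySem.Chars.isalnum i && (PySem.Chars.lower string1.toList).contains i
                    then acc ++ [i] else acc) []
  if match1.length = match2.length then true else false

-- ===== PORT B =====
def is_character_match_alt (string1 : String) (string2 : String) : Bool :=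
  let c1 := (PySem.Chars.lower string1.toList).foldl
      (fun d ch => d.insert ch (d.getD ch 0 + 1)) (PySem.Dict.empty : PySem.Dict Char Int)
  let c2 := (PySem.Chars.lower string2.toList).foldl
      (fun d ch => d.insert ch (d.getD ch 0 + 1)) (PySem.Dict.empty : PySem.Dict Char Int)
  let p := c1.items.foldl
      (fun (p : Int × Int) kv =>
        if PySem.Chars.isalnum kv.1 && c2.contains kv.1
        then (p.1 + kv.2, p.2 + c2.getD kv.1 0) else p) (0, 0)
  p.1 == p.2

-- ===== PRECONDITION & SPEC =====
def Spec_is_character_match (string1 : String) (string2 : String) (out : Bool) : Prop := out = is_character_match_alt string1 string2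
instance (string1 : String) (string2 : String) (out : Bool) : Decidable (Spec_is_character_match string1 string2 out) := by unfold Spec_is_character_match; infer_instance

-- ===== CLAIM (what is proved, stated in full; the proofs are below) =====
def Claim_equal_is_character_match : Prop := ∀ (string1 : String) (string2 : String), Dom_is_character_match string1 string2 → Spec_is_character_match string1 string2 (is_character_match string1 string2)

-- ===== LEMMAS AND PROOFS =====

-- B's summation loop over (key, count) items, split into its two independent components.
theorem pv_foldl_pair (xs : List (Char × Int)) (q : Char → Bool) (g : Char → Int) (a b : Int) :
    xs.foldl (fun (p : Int × Int) kv => if q kv.1 then (p.1 + kv.2, p.2 + g kv.1) else p) (a, b)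
      = (a + ((xs.filter (fun kv => q kv.1)).map (fun kv => kv.2)).sum,
         b + ((xs.filter (fun kv => q kv.1)).map (fun kv => g kv.1)).sum) := by
  induction xs generalizing a b with
  | nil => simp
  | cons kv t ih =>
      by_cases h : q kv.1 = true
      · simp [h, ih, add_assoc]
      · simp [h, ih]

-- A's 'len(match1) == len(match2)' against B's comparison of the two Int sums.
theorem pv_if_cast (a b : Nat) : (if a = b then true else false) = (((a : Int)) == ((b : Int))) := by
  by_cases h : a = b <;> simp [h]

-- Summing full counts of a list over any nodup key list with the right membership gives countP.
theorem pv_sum_count (l : List Char) (d : List Char) (p : Char → Bool)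
    (hnd : d.Nodup) (hmem : ∀ k, k ∈ d ↔ (p k = true ∧ k ∈ l)) :
    ((d.map (fun k => l.count k)).sum) = l.countP p := by
  have hperm : d.Perm (l.dedup.filter p) := by
    apply List.perm_of_nodup_nodup_toFinset_eq hnd (List.Nodup.filter _ l.nodup_dedup)
    ext k
    simp [List.mem_filter, List.mem_dedup, hmem k, and_comm]
  calc ((d.map (fun k => l.count k)).sum)
      = (((l.dedup.filter p).map (fun k => l.count k)).sum) := (hperm.map _).sum_eq
    _ = l.countP p := List.sum_map_count_dedup_filter_eq_countP p l

theorem is_character_match_eq (string1 string2 : String) :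
    is_character_match string1 string2 = is_character_match_alt string1 string2 := by
  unfold is_character_match is_character_match_alt
  set l1 := PySem.Chars.lower string1.toList with hl1
  set l2 := PySem.Chars.lower string2.toList with hl2
  simp only [PySem.Dict.foldl_insert_getD_add_one_eq_counter,
    PySem.List.foldl_append_if_eq_filter, List.nil_append,
    PySem.Dict.items_counter]
  have hp := pv_foldl_pair (List.map (fun k => (k, ((List.count k l1 : Nat) : Int))) (PySem.Set.ofList l1))
      (fun i => PySem.Chars.isalnum i && (PySem.Dict.counter l2).contains i)
      (fun k => (PySem.Dict.counter l2).getD k 0) 0 0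
  rw [hp]
  simp only [zero_add, List.filter_map, List.map_map, Function.comp_def]
  set d : List Char := List.filter (fun k => PySem.Chars.isalnum k && (PySem.Dict.counter l2).contains k) (PySem.Set.ofList l1) with hd
  have hdnd : d.Nodup := List.Nodup.filter _ (PySem.Set.nodup_ofList l1)
  have hdmem : ∀ k, k ∈ d ↔ ((PySem.Chars.isalnum k && l2.contains k) = true ∧ k ∈ l1) := by
    intro k
    simp [hd, PySem.Set.mem_ofList, PySem.Dict.contains_counter, and_comm]
  have hdmem2 : ∀ k, k ∈ d ↔ ((PySem.Chars.isalnum k && l1.contains k) = true ∧ k ∈ l2) := by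
    intro k
    rw [hdmem k]
    simp only [Bool.and_eq_true, List.contains_iff_mem]
    tauto
  have h1 : ((d.map (fun k => ((List.count k l1 : Nat) : Int))).sum)
        = ((l1.countP (fun i => PySem.Chars.isalnum i && l2.contains i) : Nat) : Int) := by
    rw [← pv_sum_count l1 d (fun i => PySem.Chars.isalnum i && l2.contains i) hdnd hdmem]
    push_cast
    simp [Function.comp_def]
  have h2 : ((d.map (fun k => (PySem.Dict.counter l2).getD k 0)).sum)
        = ((l2.countP (fun i => PySem.Chars.isalnum i && l1.contains i) : Nat) : Int) := by
    rw [← pv_sum_count l2 d (fun i => PySem.Chars.isalnum i && l1.contains i) hdnd hdmem2]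
    push_cast
    simp [Function.comp_def, PySem.Dict.getD_counter]
  rw [h1, h2]
  simp only [List.countP_eq_length_filter]
  exact pv_if_cast _ _

-- ===== VERDICT (by name: the statement is the Claim_ definition above) =====
theorem is_character_match_spec : Claim_equal_is_character_match := by
  intro s1 s2 _
  unfold Spec_is_character_match
  exact is_character_match_eq s1 s2
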